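-- pv_equiv track=rewrite | github.com/jaewoosong/matchpy | matchpy/utils.py | fixed_integer_vector_iter
-- ===== SOURCE A (Python) =====
-- from typing import (Callable, Dict, Iterator, List, NamedTuple, Optional, Sequence, Tuple, TypeVar, cast, Union, Any)  # pylint: disable=unused-import
--
-- def fixed_integer_vector_iter(max_vector: Tuple[int, ...], vector_sum: int) -> Iterator[Tuple[int, ...]]:
--     """
--     Return an iterator over the integer vectors which
--
--     - are componentwise less than or equal to *max_vector*, and
--     - are non-negative, and where
--     - the sum of their components is exactly *vector_sum*.
--
--     The iterator yields the vectors in lexicographical order.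
--
--     Examples:
--
--         List all vectors that are between ``(0, 0)`` and ``(2, 2)`` componentwise, where the sum of components is 2:
--
--         >>> vectors = list(fixed_integer_vector_iter([2, 2], 2))
--         >>> vectors
--         [(0, 2), (1, 1), (2, 0)]
--         >>> list(map(sum, vectors))
--         [2, 2, 2]
--
--     Args:
--         max_vector:
--             Maximum vector for the iteration. Every yielded result will be less than or equal to this componentwise.
--         vector_sum:
--             Every iterated vector will have a component sum equal to this value.
--
--     Yields:
--         All non-negative vectors that have the given sum and are not larger than the given maximum.
--     """
--     if len(max_vector) == 0:
--         if vector_sum == 0: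
--             yield tuple()
--         return
--     total = sum(max_vector)
--     if vector_sum <= total:
--         start = max(max_vector[0] + vector_sum - total, 0)
--         end = min(max_vector[0], vector_sum)
--         for j in range(start, end + 1):
--             for vec in fixed_integer_vector_iter(max_vector[1:], vector_sum - j):
--                 yield (j, ) + vec
-- ===== SOURCE B (Python) =====
-- def fixed_integer_vector_iter(max_vector, vector_sum):
--     # Breadth-first layer expansion: one pass over the positions, growing a
--     # worklist of (prefix, remaining) states pruned by precomputed suffix sums.
--     n = len(max_vector)
--     afters = [0] * n          # afters[i] = sum(max_vector[i+1:])
--     t = 0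
--     for i in range(n - 1, -1, -1):
--         afters[i] = t
--         t += max_vector[i]
--     states = [((), vector_sum)]
--     for i in range(n):
--         m = max_vector[i]
--         after = afters[i]
--         nxt = []
--         for prefix, rem in states:
--             lo = max(0, rem - after)
--             hi = min(m, rem)
--             for j in range(lo, hi + 1):
--                 nxt.append((prefix + (j,), rem - j))
--         states = nxt
--     for prefix, rem in states:
--         if rem == 0:
--             yield prefix
-- ===== Notes on version B (the rewrite author's own statement) =====
-- stated objective: alternative
-- what changed: Replaced A's per-prefix recursive generator (re-slicing and re-summing the tail at every call) by a single breadth-first pass over the positions that expands a worklist of (prefix, remaining) states, pruned with suffix sums precomputed once.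
import Mathlib
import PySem

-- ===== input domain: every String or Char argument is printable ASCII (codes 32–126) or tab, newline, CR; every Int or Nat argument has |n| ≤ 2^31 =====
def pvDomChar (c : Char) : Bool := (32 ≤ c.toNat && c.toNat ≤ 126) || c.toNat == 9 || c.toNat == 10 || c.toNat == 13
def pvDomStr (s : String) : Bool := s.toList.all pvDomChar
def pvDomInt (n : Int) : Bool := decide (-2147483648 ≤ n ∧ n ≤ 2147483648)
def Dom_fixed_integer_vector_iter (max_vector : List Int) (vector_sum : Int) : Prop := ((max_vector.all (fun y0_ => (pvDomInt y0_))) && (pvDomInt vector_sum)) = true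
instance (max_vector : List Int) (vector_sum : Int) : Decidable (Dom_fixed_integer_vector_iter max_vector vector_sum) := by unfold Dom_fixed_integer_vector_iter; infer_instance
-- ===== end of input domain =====

-- B replaces A's per-prefix recursion by a single breadth-first pass over the positions,
-- expanding a worklist of (prefix, remaining) states pruned by precomputed suffix sums
-- (objective: alternative decomposition; the generated list and its order are identical).

-- ===== PORT A =====
-- literal transliteration of A's recursive generator (yields collected into a list)
def fixed_integer_vector_iter : List Int → Int → List (List Int)
  | [], vector_sum => if vector_sum = 0 then [[]] else []
  | m :: rest, vector_sum =>
    let total := (m :: rest).sum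
    if vector_sum ≤ total then
      (PySem.List.pyRange (max (m + vector_sum - total) 0) (min m vector_sum + 1) 1).foldl
        (fun acc j =>
          acc ++ (fixed_integer_vector_iter rest (vector_sum - j)).map (fun vec => j :: vec)) []
    else []

-- ===== PORT B =====
-- afters[i] = sum(max_vector[i+1:]) built by Source B's single reverse pass
def pvAfters (max_vector : List Int) : List Int :=
  (max_vector.reverse.foldl (fun (st : List Int × Int) m => (st.2 :: st.1, st.2 + m)) ([], 0)).1

-- one layer of Source B's worklist expansion (the body of `for prefix, rem in states`)
def pvStep (states : List (List Int × Int)) (p : Int × Int) : List (List Int × Int) :=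
  states.foldl (fun nxt pr =>
    nxt ++ (PySem.List.pyRange (max 0 (pr.2 - p.2)) (min p.1 pr.2 + 1) 1).map
      (fun j => (pr.1 ++ [j], pr.2 - j))) []

def fixed_integer_vector_iter_alt (max_vector : List Int) (vector_sum : Int) : List (List Int) :=
  let states := (max_vector.zip (pvAfters max_vector)).foldl pvStep [([], vector_sum)]
  (states.filter (fun pr => pr.2 == 0)).map Prod.fst

-- ===== PRECONDITION & SPEC =====
def Spec_fixed_integer_vector_iter (max_vector : List Int) (vector_sum : Int) (out : List (List Int)) : Prop := out = fixed_integer_vector_iter_alt max_vector vector_sum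
instance (max_vector : List Int) (vector_sum : Int) (out : List (List Int)) : Decidable (Spec_fixed_integer_vector_iter max_vector vector_sum out) := by unfold Spec_fixed_integer_vector_iter; infer_instance

-- ===== CLAIM (what is proved, stated in full; the proofs are below) =====
def Claim_equal_fixed_integer_vector_iter : Prop := ∀ (max_vector : List Int) (vector_sum : Int), Dom_fixed_integer_vector_iter max_vector vector_sum → Spec_fixed_integer_vector_iter max_vector vector_sum (fixed_integer_vector_iter max_vector vector_sum)

-- ===== LEMMAS AND PROOFS =====

theorem pvAfters_snd (l : List Int) (st : List Int × Int) :
    (l.foldl (fun (st : List Int × Int) m => (st.2 :: st.1, st.2 + m)) st).2 = st.2 + l.sum := by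
  induction l generalizing st with
  | nil => simp
  | cons a t ih => simp [List.foldl_cons, ih]; ring

theorem pvAfters_cons (m : Int) (r : List Int) :
    pvAfters (m :: r) = r.sum :: pvAfters r := by
  unfold pvAfters
  rw [List.reverse_cons, List.foldl_append]
  simp only [List.foldl_cons, List.foldl_nil]
  rw [pvAfters_snd]
  simp [List.sum_reverse]

theorem pvStep_eq_flatMap (states : List (List Int × Int)) (p : Int × Int) :
    pvStep states p = states.flatMap (fun pr =>
      (PySem.List.pyRange (max 0 (pr.2 - p.2)) (min p.1 pr.2 + 1) 1).map
        (fun j => (pr.1 ++ [j], pr.2 - j))) := by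
  unfold pvStep
  rw [PySem.List.foldl_append_eq_flatMap]
  simp

theorem pvStep_append (a b : List (List Int × Int)) (p : Int × Int) :
    pvStep (a ++ b) p = pvStep a p ++ pvStep b p := by
  simp [pvStep_eq_flatMap]

theorem foldl_pvStep_append (zs : List (Int × Int)) (a b : List (List Int × Int)) :
    zs.foldl pvStep (a ++ b) = zs.foldl pvStep a ++ zs.foldl pvStep b := by
  induction zs generalizing a b with
  | nil => simp
  | cons z t ih => simp [List.foldl_cons, pvStep_append, ih]

theorem foldl_pvStep_nil (zs : List (Int × Int)) :
    zs.foldl pvStep [] = [] := by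
  induction zs with
  | nil => rfl
  | cons z t ih => simpa [List.foldl_cons, pvStep_eq_flatMap] using ih

theorem foldl_pvStep_flatMap (zs : List (Int × Int)) (l : List (List Int × Int)) :
    zs.foldl pvStep l = l.flatMap (fun x => zs.foldl pvStep [x]) := by
  induction l with
  | nil => simp [foldl_pvStep_nil]
  | cons x t ih =>
    have : x :: t = [x] ++ t := rfl
    rw [this, foldl_pvStep_append, ih]
    simp

theorem pv_main (mv : List Int) (pr : List Int) (s : Int) :
    (((mv.zip (pvAfters mv)).foldl pvStep [(pr, s)]).filter (fun q => q.2 == 0)).map Prod.fst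
      = (fixed_integer_vector_iter mv s).map (fun v => pr ++ v) := by
  induction mv generalizing pr s with
  | nil =>
    by_cases h : s = 0 <;> simp [fixed_integer_vector_iter, h]
  | cons m r ih =>
    rw [pvAfters_cons, List.zip_cons_cons, List.foldl_cons]
    rw [pvStep_eq_flatMap]
    simp only [List.flatMap_cons, List.flatMap_nil, List.append_nil]
    rw [foldl_pvStep_flatMap]
    rw [List.flatMap_map]
    rw [List.filter_flatMap, List.map_flatMap]
    by_cases hs : s ≤ (m :: r).sum
    · have hsum : (m :: r).sum = m + r.sum := by simp
      simp only [fixed_integer_vector_iter, hs, if_pos]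
      rw [PySem.List.foldl_append_eq_flatMap]
      simp only [List.nil_append, List.map_flatMap]
      have hrange : max (m + s - (m :: r).sum) 0 = max 0 (s - r.sum) := by
        rw [hsum]; omega
      rw [hrange]
      apply List.flatMap_congr
      intro x hx
      rw [ih]
      simp [List.map_map, Function.comp, List.append_assoc]
    · -- s > total : A returns []; B's range is empty
      have hsum : (m :: r).sum = m + r.sum := by simp
      simp only [fixed_integer_vector_iter, hs, if_neg, not_false_iff]
      have : PySem.List.pyRange (max 0 (s - r.sum)) (min m s + 1) 1 = [] := by
        rw [PySem.List.pyRange_one]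
        have : (min m s + 1 - max 0 (s - r.sum)).toNat = 0 := by omega
        rw [this]; simp
      rw [this]
      simp

-- ===== VERDICT (by name: the statement is the Claim_ definition above) =====
theorem fixed_integer_vector_iter_spec : Claim_equal_fixed_integer_vector_iter := by
  intro mv vs _
  unfold Spec_fixed_integer_vector_iter fixed_integer_vector_iter_alt
  have := pv_main mv [] vs
  simp at this
  simp [this]
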